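-- pv_equiv track=rewrite | github.com/1688168/Codes | LC/[2534] Time-Taken-to-Cross-the-Door.py | timeTaken
-- ===== SOURCE A (Python) =====
-- from typing import List
--
-- from collections import deque
--
-- def timeTaken(arrival: List[int], state: List[int]) -> List[int]:
--     enter_pool, exit_pool = deque(), deque()
--     cur_time = 0
--     prev_state = 1
--     i = 0
--     ans = [0 for _ in range(len(arrival))]
--     while i < len(arrival) or enter_pool or exit_pool:
--         while i < len(arrival) and arrival[i] <= cur_time:
--             if state[i] == 0:
--                 enter_pool.append(i)
--             else:
--                 exit_pool.append(i)
--             i += 1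
--         if prev_state == 1:
--             if exit_pool:
--                 ans[exit_pool.popleft()] = cur_time
--             elif enter_pool:
--                 ans[enter_pool.popleft()] = cur_time
--                 prev_state = 0
--         else:
--             if enter_pool:
--                 ans[enter_pool.popleft()] = cur_time
--             elif exit_pool:
--                 ans[exit_pool.popleft()] = cur_time
--                 prev_state = 1
--             else:
--                 prev_state = 1
--         cur_time += 1
--     return ans
-- ===== SOURCE B (Python) =====
-- from typing import List
--
-- from collections import deque
--
-- def timeTaken(arrival: List[int], state: List[int]) -> List[int]:
--     # Event-driven: precompute prefix maxima of arrival and jump over idle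
--     # gaps (resetting the door to 'exit had priority'), so each loop
--     # iteration serves exactly one person: O(n) instead of O(max arrival).
--     n = len(arrival)
--     eff = []
--     m = 0
--     for a in arrival:
--         m = max(m, a)
--         eff.append(m)
--     ans = [0] * n
--     enter, exit_ = deque(), deque()
--     i, t, prev = 0, 0, 1
--     while i < n or enter or exit_:
--         if not enter and not exit_ and eff[i] > t:
--             t = eff[i]
--             prev = 1
--         while i < n and eff[i] <= t:
--             (enter if state[i] == 0 else exit_).append(i)
--             i += 1
--         if exit_ and (prev == 1 or not enter):
--             ans[exit_.popleft()] = t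
--             prev = 1
--         else:
--             ans[enter.popleft()] = t
--             prev = 0
--         t += 1
--     return ans
-- ===== Notes on version B (the rewrite author's own statement) =====
-- stated objective: faster
-- what changed: B precomputes prefix maxima of arrival and jumps the clock over idle gaps (resetting the door priority, which one idle tick of A already does), so the loop runs once per person instead of once per time unit.
import Mathlib
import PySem

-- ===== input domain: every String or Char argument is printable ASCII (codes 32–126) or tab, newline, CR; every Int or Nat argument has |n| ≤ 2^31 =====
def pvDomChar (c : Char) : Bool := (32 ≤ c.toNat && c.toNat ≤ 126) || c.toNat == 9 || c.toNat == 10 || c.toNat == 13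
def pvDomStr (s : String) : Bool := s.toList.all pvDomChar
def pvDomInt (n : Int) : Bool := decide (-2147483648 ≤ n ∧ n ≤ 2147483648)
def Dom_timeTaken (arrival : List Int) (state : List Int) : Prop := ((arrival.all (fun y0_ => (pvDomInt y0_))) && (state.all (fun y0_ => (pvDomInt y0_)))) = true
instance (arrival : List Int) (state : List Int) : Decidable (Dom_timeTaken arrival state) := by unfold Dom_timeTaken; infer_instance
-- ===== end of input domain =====

-- B changes the time-stepped simulation into an event-driven one (prefix maxima + clock jumps), O(n) instead of O(max arrival); equal return values proved on Pre_.

-- ===== PORT A =====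
-- inner `while i < len(arrival) and arrival[i] <= cur_time` of A
def queueA (arrival state : List Int) (i : Nat) (t : Int) (en ex : List Nat) :
    Nat × List Nat × List Nat :=
  if h : i < arrival.length ∧ arrival.getD i 0 ≤ t then
    if state.getD i 0 = 0 then queueA arrival state (i + 1) t (en ++ [i]) ex
    else queueA arrival state (i + 1) t en (ex ++ [i])
  else (i, en, ex)
termination_by arrival.length - i
decreasing_by all_goals omega

-- outer while of A; the fuel argument is only a totality guard (proved sufficient below)
def runA (arrival state : List Int) :
    Nat → Nat → Int → Int → List Nat → List Nat → List Int → List Int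
  | 0, _, _, _, _, _, ans => ans
  | fuel + 1, i, t, prev, en, ex, ans =>
    if i < arrival.length ∨ en ≠ [] ∨ ex ≠ [] then
      match queueA arrival state i t en ex with
      | (i', en', ex') =>
        if prev = 1 then
          match ex' with
          | j :: ex'' => runA arrival state fuel i' (t + 1) prev en' ex'' (ans.set j t)
          | [] =>
            match en' with
            | j :: en'' => runA arrival state fuel i' (t + 1) 0 en'' ex' (ans.set j t)
            | [] => runA arrival state fuel i' (t + 1) prev en' ex' ans
        else
          match en' with
          | j :: en'' => runA arrival state fuel i' (t + 1) prev en'' ex' (ans.set j t)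
          | [] =>
            match ex' with
            | j :: ex'' => runA arrival state fuel i' (t + 1) 1 en' ex'' (ans.set j t)
            | [] => runA arrival state fuel i' (t + 1) 1 en' ex' ans
    else ans

def timeTaken (arrival : List Int) (state : List Int) : List Int :=
  runA arrival state ((arrival.foldl (fun m a => max m a) 0).toNat + arrival.length + 1)
    0 0 1 [] [] (List.replicate arrival.length 0)

-- ===== PORT B =====
-- `for a in arrival: m = max(m, a); eff.append(m)`
def effList : List Int → Int → List Int
  | [], _ => []
  | a :: r, m => max m a :: effList r (max m a)

-- inner `while i < n and eff[i] <= t` of B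
def queueB (eff state : List Int) (n : Nat) (i : Nat) (t : Int) (en ex : List Nat) :
    Nat × List Nat × List Nat :=
  if h : i < n ∧ eff.getD i 0 ≤ t then
    if state.getD i 0 = 0 then queueB eff state n (i + 1) t (en ++ [i]) ex
    else queueB eff state n (i + 1) t en (ex ++ [i])
  else (i, en, ex)
termination_by n - i
decreasing_by all_goals omega

-- outer while of B; fuel n+1 is a totality guard (each iteration serves one person)
def runB (eff state : List Int) (n : Nat) :
    Nat → Nat → Int → Int → List Nat → List Nat → List Int → List Int
  | 0, _, _, _, _, _, ans => ans
  | fuel + 1, i, t, prev, en, ex, ans =>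
    if i < n ∨ en ≠ [] ∨ ex ≠ [] then
      let t' := if en = [] ∧ ex = [] ∧ t < eff.getD i 0 then eff.getD i 0 else t
      let prev' := if en = [] ∧ ex = [] ∧ t < eff.getD i 0 then 1 else prev
      match queueB eff state n i t' en ex with
      | (i', en', ex') =>
        if ex' ≠ [] ∧ (prev' = 1 ∨ en' = []) then
          match ex' with
          | j :: ex'' => runB eff state n fuel i' (t' + 1) 1 en' ex'' (ans.set j t')
          | [] => ans   -- unreachable: the branch condition has ex' ≠ []
        else
          match en' with
          | j :: en'' => runB eff state n fuel i' (t' + 1) 0 en'' ex' (ans.set j t')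
          | [] => ans   -- unreachable: some pool is nonempty whenever served
    else ans

def timeTaken_alt (arrival : List Int) (state : List Int) : List Int :=
  runB (effList arrival 0) state arrival.length (arrival.length + 1)
    0 0 1 [] [] (List.replicate arrival.length 0)

-- ===== PRECONDITION & SPEC =====
-- Pre_ excludes exactly the inputs where Python A raises IndexError (state shorter than arrival).
def Pre_timeTaken (arrival : List Int) (state : List Int) : Prop :=
  arrival.length ≤ state.length
instance (arrival : List Int) (state : List Int) : Decidable (Pre_timeTaken arrival state) := by
  unfold Pre_timeTaken; infer_instance

def pvWitness_timeTaken : List Int × List Int := ([0, 1, 1, 2, 4], [0, 1, 0, 0, 1])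

def Spec_timeTaken (arrival : List Int) (state : List Int) (out : List Int) : Prop := out = timeTaken_alt arrival state
instance (arrival : List Int) (state : List Int) (out : List Int) : Decidable (Spec_timeTaken arrival state out) := by unfold Spec_timeTaken; infer_instance

-- ===== CLAIM (what is proved, stated in full; the proofs are below) =====
def Claim_equal_timeTaken : Prop := ∀ (arrival : List Int) (state : List Int), Dom_timeTaken arrival state → Pre_timeTaken arrival state → Spec_timeTaken arrival state (timeTaken arrival state)

-- ===== LEMMAS AND PROOFS =====

lemma foldl_max_init (l : List Int) : ∀ m : Int, m ≤ l.foldl (fun x y => max x y) m := by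
  induction l with
  | nil => intro m; simp
  | cons a r ih =>
      intro m
      simpa using le_trans (le_max_left m a) (ih (max m a))

lemma foldl_max_ge (l : List Int) :
    ∀ (m : Int) (k : Nat), k < l.length → l.getD k 0 ≤ l.foldl (fun x y => max x y) m := by
  induction l with
  | nil => intro m k h; simp at h
  | cons a r ih =>
      intro m k h
      cases k with
      | zero =>
          simpa using le_trans (le_max_right m a) (foldl_max_init r (max m a))
      | succ k => simpa using ih (max m a) k (by simpa using h)

lemma effList_max (l : List Int) :
    ∀ (k : Nat) (m t : Int), k < l.length → m ≤ t → (∀ j, j < k → l.getD j 0 ≤ t) →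
    max t ((effList l m).getD k 0) = max t (l.getD k 0) := by
  induction l with
  | nil => intro k m t h; simp at h
  | cons a r ih =>
      intro k m t h hm hj
      cases k with
      | zero => simp [effList]; omega
      | succ k =>
          have ha : a ≤ t := by simpa using hj 0 (Nat.succ_pos _)
          simpa [effList] using
            ih k (max m a) t (by simpa using h) (by omega)
              (fun j hjk => by simpa using hj (j + 1) (by omega))

lemma queue_eq (arrival state : List Int) :
    ∀ (i : Nat) (t : Int) (en ex : List Nat),
    0 ≤ t → (∀ k, k < i → arrival.getD k 0 ≤ t) →
    queueB (effList arrival 0) state arrival.length i t en ex =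
      queueA arrival state i t en ex := by
  intro i
  induction hni : arrival.length - i using Nat.strong_induction_on generalizing i with
  | _ d ih =>
      intro t en ex ht H1
      rw [queueA, queueB]
      by_cases hi : i < arrival.length
      · have hmax : max t ((effList arrival 0).getD i 0) = max t (arrival.getD i 0) :=
          effList_max arrival i 0 t hi ht H1
        by_cases ha : arrival.getD i 0 ≤ t
        · have he : (effList arrival 0).getD i 0 ≤ t := by
            have : max t ((effList arrival 0).getD i 0) = t := by rw [hmax]; omega
            omega
          have H1' : ∀ k, k < i + 1 → arrival.getD k 0 ≤ t := by
            intro k hk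
            rcases Nat.lt_succ_iff_lt_or_eq.mp hk with h | h
            · exact H1 k h
            · subst h; exact ha
          rw [dif_pos ⟨hi, he⟩, dif_pos ⟨hi, ha⟩]
          split
          · exact ih (arrival.length - (i + 1)) (by omega) (i + 1) rfl t _ _ ht H1'
          · exact ih (arrival.length - (i + 1)) (by omega) (i + 1) rfl t _ _ ht H1'
        · have he : ¬ (effList arrival 0).getD i 0 ≤ t := by
            intro hle
            have : max t ((effList arrival 0).getD i 0) = t := by omega
            omega
          rw [dif_neg (by tauto), dif_neg (by tauto)]
      · rw [dif_neg (by tauto), dif_neg (by tauto)]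

-- properties of one run of A's inner while
lemma queueA_spec (arrival state : List Int) :
    ∀ (i : Nat) (t : Int) (en ex : List Nat) (i' : Nat) (en' ex' : List Nat),
    i ≤ arrival.length → (∀ k, k < i → arrival.getD k 0 ≤ t) →
    queueA arrival state i t en ex = (i', en', ex') →
    i ≤ i' ∧ i' ≤ arrival.length ∧
    (arrival.length - i') + en'.length + ex'.length
      = (arrival.length - i) + en.length + ex.length ∧
    (∀ k, k < i' → arrival.getD k 0 ≤ t) ∧
    (∃ d1 d2, en' = en ++ d1 ∧ ex' = ex ++ d2) ∧
    (i < arrival.length → arrival.getD i 0 ≤ t → i < i') := by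
  intro i
  induction hni : arrival.length - i using Nat.strong_induction_on generalizing i with
  | _ d ih =>
      intro t en ex i' en' ex' hin H1 hqa
      rw [queueA] at hqa
      by_cases hc2 : i < arrival.length ∧ arrival.getD i 0 ≤ t
      · have H1' : ∀ k, k < i + 1 → arrival.getD k 0 ≤ t := by
          intro k hk
          rcases Nat.lt_succ_iff_lt_or_eq.mp hk with h | h
          · exact H1 k h
          · subst h; exact hc2.2
        rw [dif_pos hc2] at hqa
        by_cases hst : state.getD i 0 = 0
        · rw [if_pos hst] at hqa
          obtain ⟨h1, h2, h3, h4, ⟨d1, d2, h5, h6⟩, h7⟩ :=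
            ih (arrival.length - (i + 1)) (by omega) (i + 1) rfl t (en ++ [i]) ex
              i' en' ex' (by omega) H1' hqa
          exact ⟨by omega, h2, by simp at h3; omega, h4,
            ⟨i :: d1, d2, by simpa using h5, h6⟩, fun _ _ => by omega⟩
        · rw [if_neg hst] at hqa
          obtain ⟨h1, h2, h3, h4, ⟨d1, d2, h5, h6⟩, h7⟩ :=
            ih (arrival.length - (i + 1)) (by omega) (i + 1) rfl t en (ex ++ [i])
              i' en' ex' (by omega) H1' hqa
          exact ⟨by omega, h2, by simp at h3; omega, h4,
            ⟨d1, i :: d2, h5, by simpa using h6⟩, fun _ _ => by omega⟩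
      · rw [dif_neg hc2] at hqa
        simp only [Prod.mk.injEq] at hqa
        obtain ⟨rfl, rfl, rfl⟩ := hqa
        exact ⟨le_rfl, hin, by omega, H1, ⟨[], [], by simp, by simp⟩,
          fun h1 h2 => absurd ⟨h1, h2⟩ hc2⟩

-- A only idles (incrementing the clock, resetting prev to 1) until the next arrival
lemma runA_idle (arrival state : List Int) :
    ∀ (g f : Nat) (i : Nat) (t prev : Int) (ans : List Int),
    1 ≤ g → g ≤ f → i < arrival.length → (prev = 0 ∨ prev = 1) →
    arrival.getD i 0 = t + g →
    runA arrival state f i t prev [] [] ans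
      = runA arrival state (f - g) i (t + g) 1 [] [] ans := by
  intro g
  induction g with
  | zero => omega
  | succ g ih =>
      intro f i t prev ans _ hgf hi hprev hE
      obtain ⟨f', rfl⟩ : ∃ f', f = f' + 1 := ⟨f - 1, by omega⟩
      have hq : queueA arrival state i t [] [] = (i, [], []) := by
        rw [queueA, dif_neg]; push_neg; intro _; omega
      have hstep : runA arrival state (f' + 1) i t prev [] [] ans
          = runA arrival state f' i (t + 1) 1 [] [] ans := by
        rw [runA, if_pos (Or.inl hi), hq]
        rcases hprev with h | h <;> simp [h]
      rw [hstep]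
      by_cases hg : g = 0
      · subst hg
        have e1 : f' + 1 - (0 + 1) = f' := by omega
        have e2 : t + ((0 + 1 : Nat) : Int) = t + 1 := by push_cast; ring
        rw [e1, e2]
      · rw [ih f' i (t + 1) 1 ans (by omega) (by omega) hi (Or.inr rfl)
          (by push_cast at hE ⊢; omega)]
        have e1 : f' - g = f' + 1 - (g + 1) := by omega
        have e2 : (t + 1 + (g : Int)) = t + ((g + 1 : Nat) : Int) := by push_cast; ring
        rw [e1, e2]

-- main simulation lemma: from any aligned reachable state the two loops agree
lemma sim (arrival state : List Int) :
    ∀ (fB fA : Nat) (i : Nat) (t prev : Int) (en ex : List Nat) (ans : List Int),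
    i ≤ arrival.length → 0 ≤ t → (prev = 0 ∨ prev = 1) →
    (∀ k, k < i → arrival.getD k 0 ≤ t) →
    ((arrival.foldl (fun m a => max m a) 0) - t).toNat
        + ((arrival.length - i) + en.length + ex.length) + 1 ≤ fA →
    ((arrival.length - i) + en.length + ex.length) + 1 ≤ fB →
    runA arrival state fA i t prev en ex ans
      = runB (effList arrival 0) state arrival.length fB i t prev en ex ans := by
  intro fB
  induction fB with
  | zero => intro fA i t prev en ex ans _ _ _ _ _ hfB; omega
  | succ fB ih =>
    intro fA i t prev en ex ans hin ht hprev H1 hfA hfB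
    obtain ⟨fA', rfl⟩ : ∃ f', fA = f' + 1 := ⟨fA - 1, by omega⟩
    by_cases hc : i < arrival.length ∨ en ≠ [] ∨ ex ≠ []
    case neg => rw [runA, runB, if_neg hc, if_neg hc]
    case pos =>
    -- one aligned iteration (no clock jump on B's side), then the induction hypothesis
    have step : ∀ (fa : Nat) (T P : Int), 0 ≤ T → (P = 0 ∨ P = 1) →
        (∀ k, k < i → arrival.getD k 0 ≤ T) →
        ¬ (en = [] ∧ ex = [] ∧ T < (effList arrival 0).getD i 0) →
        ((arrival.foldl (fun m a => max m a) 0) - T).toNat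
            + ((arrival.length - i) + en.length + ex.length) + 1 ≤ fa + 1 →
        runA arrival state (fa + 1) i T P en ex ans
          = runB (effList arrival 0) state arrival.length (fB + 1) i T P en ex ans := by
      intro fa T P hT hP H1T hnj hfa
      have hq : queueB (effList arrival 0) state arrival.length i T en ex
          = queueA arrival state i T en ex := queue_eq arrival state i T en ex hT H1T
      rcases hqa : queueA arrival state i T en ex with ⟨i', en', ex'⟩
      rw [hqa] at hq
      obtain ⟨h1, h2, h3, h4, ⟨d1, d2, h5, h6⟩, h7⟩ :=
        queueA_spec arrival state i T en ex i' en' ex' hin H1T hqa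
      have hserve : en' ≠ [] ∨ ex' ≠ [] := by
        by_cases he : en = [] ∧ ex = []
        · obtain ⟨rfl, rfl⟩ := he
          have hi : i < arrival.length := by
            rcases hc with h | h | h
            · exact h
            · exact absurd rfl h
            · exact absurd rfl h
          have heff : (effList arrival 0).getD i 0 ≤ T := by
            by_contra hx
            exact hnj ⟨rfl, rfl, by omega⟩
          have hmax := effList_max arrival i 0 T hi hT H1T
          have harr : arrival.getD i 0 ≤ T := by
            have h' : max T (arrival.getD i 0) = T := by
              rw [← hmax]; exact max_eq_left heff
            exact max_eq_left_iff.mp h'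
          have hii := h7 hi harr
          by_contra hno
          push_neg at hno
          obtain ⟨hn1, hn2⟩ := hno
          subst hn1; subst hn2
          simp at h3
          omega
        · rcases not_and_or.mp he with h | h
          · left; rw [h5]; intro hx; simp at hx; exact h hx.1
          · right; rw [h6]; intro hx; simp at hx; exact h hx.1
      have H1' : ∀ k, k < i' → arrival.getD k 0 ≤ T + 1 := fun k hk => by
        have := h4 k hk; omega
      rw [runA, runB, if_pos hc, if_pos hc]
      simp only [if_neg hnj]
      rw [hq, hqa]
      rcases hP with rfl | rfl
      · -- prev = 0
        dsimp only
        rw [if_neg (by norm_num : ¬ (0:Int) = 1)]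
        cases hen : en' with
        | cons j en'' =>
          subst hen
          dsimp only
          rw [if_neg (by simp : ¬ (ex' ≠ [] ∧ ((0:Int) = 1 ∨ j :: en'' = [])))]
          exact ih fa i' (T + 1) 0 en'' ex' (ans.set j T) h2 (by omega) (Or.inl rfl) H1'
            (by simp only [List.length_cons, List.length_nil] at *; omega) (by simp only [List.length_cons, List.length_nil] at *; omega)
        | nil =>
          cases hex : ex' with
          | nil => subst hen; subst hex; rcases hserve with h | h <;> simp at h
          | cons j ex'' =>
            subst hen; subst hex
            dsimp only
            rw [if_pos (by simp : ((j :: ex'' : List Nat) ≠ [] ∧ ((0:Int) = 1 ∨ ([] : List Nat) = [])))]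
            exact ih fa i' (T + 1) 1 [] ex'' (ans.set j T) h2 (by omega) (Or.inr rfl) H1'
              (by simp only [List.length_cons, List.length_nil] at *; omega) (by simp only [List.length_cons, List.length_nil] at *; omega)
      · -- prev = 1
        dsimp only
        rw [if_pos (rfl : (1:Int) = 1)]
        cases hex : ex' with
        | cons j ex'' =>
          subst hex
          dsimp only
          rw [if_pos (by simp : ((j :: ex'' : List Nat) ≠ [] ∧ ((1:Int) = 1 ∨ en' = [])))]
          exact ih fa i' (T + 1) 1 en' ex'' (ans.set j T) h2 (by omega) (Or.inr rfl) H1'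
            (by simp only [List.length_cons, List.length_nil] at *; omega) (by simp only [List.length_cons, List.length_nil] at *; omega)
        | nil =>
          cases hen : en' with
          | nil => subst hen; subst hex; rcases hserve with h | h <;> simp at h
          | cons j en'' =>
            subst hen; subst hex
            dsimp only
            rw [if_neg (by simp : ¬ (([] : List Nat) ≠ [] ∧ ((1:Int) = 1 ∨ j :: en'' = [])))]
            exact ih fa i' (T + 1) 0 en'' [] (ans.set j T) h2 (by omega) (Or.inl rfl) H1'
              (by simp only [List.length_cons, List.length_nil] at *; omega) (by simp only [List.length_cons, List.length_nil] at *; omega)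
    by_cases hj : en = [] ∧ ex = [] ∧ t < (effList arrival 0).getD i 0
    · -- idle gap: A idles up to the next arrival, B jumps there directly
      obtain ⟨rfl, rfl, hlt⟩ := hj
      have hi : i < arrival.length := by
        rcases hc with h | h | h
        · exact h
        · exact absurd rfl h
        · exact absurd rfl h
      have hmax := effList_max arrival i 0 t hi ht H1
      have hEeff : (effList arrival 0).getD i 0 = arrival.getD i 0 := by
        have h1 : max t ((effList arrival 0).getD i 0) = (effList arrival 0).getD i 0 :=
          max_eq_right (le_of_lt hlt)
        rw [h1] at hmax
        rcases max_choice t (arrival.getD i 0) with h | h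
        · rw [h] at hmax; omega
        · rw [h] at hmax; exact hmax
      have hEt : t < arrival.getD i 0 := by rw [← hEeff]; exact hlt
      have hEM : arrival.getD i 0 ≤ arrival.foldl (fun m a => max m a) 0 :=
        foldl_max_ge arrival 0 i hi
      have hg1 : 1 ≤ (arrival.getD i 0 - t).toNat := by omega
      have hgf : (arrival.getD i 0 - t).toNat ≤ fA' + 1 := by simp at hfA; omega
      have hA := runA_idle arrival state (arrival.getD i 0 - t).toNat (fA' + 1) i t prev ans
        hg1 hgf hi hprev (by omega)
      rw [hA]
      have hEg : (effList arrival 0).getD i 0 = t + ((arrival.getD i 0 - t).toNat : Int) := by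
        rw [hEeff]; omega
      have hB : runB (effList arrival 0) state arrival.length (fB + 1) i t prev [] [] ans
          = runB (effList arrival 0) state arrival.length (fB + 1) i
              (t + ((arrival.getD i 0 - t).toNat : Int)) 1 [] [] ans := by
        have c1 : (([] : List Nat) = [] ∧ ([] : List Nat) = [] ∧
            t < t + ((arrival.getD i 0 - t).toNat : Int)) := ⟨rfl, rfl, by omega⟩
        have c2 : ¬ (([] : List Nat) = [] ∧ ([] : List Nat) = [] ∧
            t + ((arrival.getD i 0 - t).toNat : Int)
              < t + ((arrival.getD i 0 - t).toNat : Int)) := fun h => lt_irrefl _ h.2.2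
        rw [runB, runB, if_pos hc, if_pos hc, hEg]
        rw [if_pos c1, if_pos c1, if_neg c2, if_neg c2]
      rw [hB]
      obtain ⟨fa, hfa⟩ : ∃ fa, fA' + 1 - (arrival.getD i 0 - t).toNat = fa + 1 := by
        refine ⟨fA' - (arrival.getD i 0 - t).toNat, ?_⟩
        simp at hfA; omega
      rw [hfa]
      exact step fa (t + ((arrival.getD i 0 - t).toNat : Int)) 1 (by omega) (Or.inr rfl)
        (fun k hk => by have := H1 k hk; omega)
        (by rw [hEg]; exact fun h => lt_irrefl _ h.2.2)
        (by simp only [List.length_nil] at *; omega)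
    · exact step fA' t prev ht hprev H1 hj hfA

-- ===== VERDICT (by name: the statement is the Claim_ definition above) =====
theorem timeTaken_spec : Claim_equal_timeTaken := by
  intro arrival state _ _
  unfold Spec_timeTaken timeTaken timeTaken_alt
  exact sim arrival state (arrival.length + 1)
    ((arrival.foldl (fun m a => max m a) 0).toNat + arrival.length + 1)
    0 0 1 [] [] (List.replicate arrival.length 0) (by omega) le_rfl (Or.inr rfl)
    (fun k hk => absurd hk (Nat.not_lt_zero k)) (by simp) (by simp)
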